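-- pv_equiv track=rewrite | github.com/yair-shtern/Intro2CS | ex5/wordsearch.py | check_up
-- ===== SOURCE A (Python) =====
-- def count_word(word,string):
--     """
--     Count the appearance of word in string (at list 1)
--     :param: word: a word to search in string
--     :param: string: a string
--     :return: the count of appearance of word in string
--     """
--     count = 1
--     short_string = string[string.find(word) + 1:]
--     while string != '':
--         if word in short_string:
--             count += 1
--             short_string = short_string[short_string.find(word) + 1:]
--         else:
--             break
--     return count
--
-- def check_and_update(result_dict,string,word_list):
--     """
--     Check if word in a string and update in the result dict
--     :param: result_dict: a dict with the result of the word founds so far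
--     :param: string: a string
--     :param: word_list: a list of word to check if in the string
--     :return: None
--     """
--     for word in word_list:
--         if word in string:
--             if word in result_dict:
--                 result_dict[word] += count_word(word,string)
--             else:
--                 result_dict[word] = count_word(word,string)
--     return
--
-- def check_up(result_dict,word_list,matrix):
--     """
--     Check if words in the matrix in direction - up
--     :param: result_dict: a dict with the result of the word founds so far
--     :param: word_list: a list of words
--     :param: matrix: a matrix to check on
--     :return: the updated dict
--     """
--     for j in range(len(matrix[0])):
--         i = len(matrix) - 1
--         string = ''
--         while i >= 0:
--             string += matrix[i][j]
--             i -= 1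
--         check_and_update(result_dict,string,word_list)
--     return result_dict
-- ===== SOURCE B (Python) =====
-- def check_up(result_dict, word_list, matrix):
--     # Group-by-length substring index per column: build one counter of all
--     # substrings of each relevant length, then each word is a single lookup.
--     lengths = sorted({len(w) for w in word_list if w})
--     for j in range(len(matrix[0])):
--         s = ''.join(row[j] for row in reversed(matrix))
--         counters = {}
--         for L in lengths:
--             c = {}
--             for i in range(len(s) - L + 1):
--                 sub = s[i:i + L]
--                 c[sub] = c.get(sub, 0) + 1
--             counters[L] = c
--         for word in word_list:
--             cnt = counters.get(len(word), {}).get(word, 0)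
--             if cnt:
--                 result_dict[word] = result_dict.get(word, 0) + cnt
--     return result_dict
-- ===== Notes on version B (the rewrite author's own statement) =====
-- stated objective: faster
-- what changed: Instead of A's per-word substring search and find-and-skip rescan of each column string, B builds for each column one substring-count index grouped by word length, so every word's overlapping count becomes a single dictionary lookup.
-- outside the precondition, e.g. on check_up({}, [''], [['']]): A returns {'': 1}, B returns {}
import Mathlib
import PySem

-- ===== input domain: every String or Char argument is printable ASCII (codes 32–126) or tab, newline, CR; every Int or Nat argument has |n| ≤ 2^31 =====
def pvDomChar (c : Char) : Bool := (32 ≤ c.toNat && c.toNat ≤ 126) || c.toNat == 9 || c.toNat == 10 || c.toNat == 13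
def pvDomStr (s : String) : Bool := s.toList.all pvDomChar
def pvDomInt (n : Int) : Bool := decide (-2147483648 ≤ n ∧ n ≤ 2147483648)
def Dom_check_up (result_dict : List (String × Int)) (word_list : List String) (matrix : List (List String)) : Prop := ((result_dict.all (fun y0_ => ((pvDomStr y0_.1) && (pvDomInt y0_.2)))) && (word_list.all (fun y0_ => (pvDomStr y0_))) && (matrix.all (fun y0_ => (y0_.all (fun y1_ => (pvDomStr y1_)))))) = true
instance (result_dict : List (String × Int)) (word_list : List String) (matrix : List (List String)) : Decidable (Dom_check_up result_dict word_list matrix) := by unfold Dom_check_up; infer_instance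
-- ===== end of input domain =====

-- B replaces A's per-word find-and-skip rescans of every column string by one
-- per-column substring-count index grouped by word length, so each word becomes a
-- single dictionary lookup (objective: faster for many words, constant/asymptotic in |word_list|).
-- A mutates result_dict in place; the equivalence proved here is about the RETURN value only.

-- ===== PORT A =====
-- count_word's `while` loop; Python terminates wherever Pre_ admits the call
-- (word ≠ ''): each pass drops ≥ 1 char from short, so fuel short.length+1 is
-- never exhausted there.
def countWordLoop (word : List Char) : Nat → List Char → Int → Int
  | 0, _, count => count
  | fuel+1, short, count =>
    if PySem.Chars.isIn word short then
      countWordLoop word fuel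
        (PySem.List.slice short (some (PySem.Chars.find short word + 1)) none) (count + 1)
    else count

def count_word (word string : List Char) : Int :=
  let short := PySem.List.slice string (some (PySem.Chars.find string word + 1)) none
  if string = [] then 1 else countWordLoop word (short.length + 1) short 1

def check_and_update (result_dict : PySem.Dict String Int) (string : List Char)
    (word_list : List String) : PySem.Dict String Int :=
  word_list.foldl (fun d word =>
    if PySem.Chars.isIn word.toList string then
      if d.contains word then d.modify word 0 (· + count_word word.toList string)
      else d.insert word (count_word word.toList string)
    else d) result_dict

-- matrix[0] and matrix[i][j] are total here via getD; Pre_ keeps exactly the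
-- inputs where Python's indexing does not raise, so the defaults are never hit.
def check_up (result_dict : List (String × Int)) (word_list : List String)
    (matrix : List (List String)) : List (String × Int) :=
  ((List.range (matrix.headD []).length).foldl (fun d j =>
      let string := (List.range matrix.length).reverse.foldl
        (fun s i => s ++ ((matrix[i]?.getD [])[j]?.getD "").toList) ([] : List Char)
      check_and_update d string word_list)
    (PySem.Dict.mk result_dict)).items

-- ===== PORT B =====
def colJoin (matrix : List (List String)) (j : Nat) : List Char :=
  PySem.Chars.join [] (matrix.reverse.map (fun row => (row[j]?.getD "").toList))

def subCounter (s : List Char) (L : Int) : PySem.Dict (List Char) Int :=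
  (PySem.List.pyRange 0 ((s.length : Int) - L + 1)).foldl (fun c i =>
    let sub := PySem.List.slice s (some i) (some (i + L))
    c.insert sub (c.getD sub 0 + 1)) PySem.Dict.empty

def check_up_alt (result_dict : List (String × Int)) (word_list : List String)
    (matrix : List (List String)) : List (String × Int) :=
  let lengths : List Int := PySem.List.sorted
    (PySem.Set.ofList ((word_list.filter (fun w => !(w.toList.isEmpty))).map
      (fun w => (w.toList.length : Int)))) (fun x => x)
  ((List.range (matrix.headD []).length).foldl (fun d j =>
      let s := colJoin matrix j
      let counters := lengths.foldl (fun cs L => cs.insert L (subCounter s L)) PySem.Dict.empty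
      word_list.foldl (fun d word =>
        let cnt : Int := (counters.getD ((word.toList.length : Int)) PySem.Dict.empty).getD word.toList 0
        if cnt ≠ 0 then d.insert word (d.getD word 0 + cnt) else d) d)
    (PySem.Dict.mk result_dict)).items

-- ===== PRECONDITION & SPEC =====
-- Pre_ excludes exactly the inputs whose behaviour is not claimed: an empty
-- matrix (matrix[0] raises IndexError), a row shorter than row 0 (matrix[i][j]
-- raises IndexError), and '' in word_list when there is at least one column:
-- there A loops forever as soon as some column string is nonempty, and on the
-- remaining all-empty-column inputs the occurrence count of the empty word is a
-- corner no caller would specify (A counts it once per column, B not at all) —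
-- both values are defensible, so the corner is left outside the claim.
def Pre_check_up (result_dict : List (String × Int)) (word_list : List String)
    (matrix : List (List String)) : Prop :=
  matrix ≠ [] ∧ (∀ row ∈ matrix, (matrix.headD []).length ≤ row.length) ∧
    ("" ∈ word_list → (matrix.headD []).length = 0)

instance (result_dict : List (String × Int)) (word_list : List String) (matrix : List (List String)) : Decidable (Pre_check_up result_dict word_list matrix) := by unfold Pre_check_up; infer_instance

def pvWitness_check_up : (List (String × Int)) × List String × List (List String) :=
  ([("b", 5)], ["aa", "b"], [["a", "b"], ["a", "b"], ["a", "c"]])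

def Spec_check_up (result_dict : List (String × Int)) (word_list : List String) (matrix : List (List String)) (out : List (String × Int)) : Prop := out = check_up_alt result_dict word_list matrix
instance (result_dict : List (String × Int)) (word_list : List String) (matrix : List (List String)) (out : List (String × Int)) : Decidable (Spec_check_up result_dict word_list matrix out) := by unfold Spec_check_up; infer_instance

-- ===== CLAIM (what is proved, stated in full; the proofs are below) =====
def Claim_equal_check_up : Prop := ∀ (result_dict : List (String × Int)) (word_list : List String) (matrix : List (List String)), Dom_check_up result_dict word_list matrix → Pre_check_up result_dict word_list matrix → Spec_check_up result_dict word_list matrix (check_up result_dict word_list matrix)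

-- ===== LEMMAS AND PROOFS =====

-- number of (overlapping) occurrence start positions of w in s
def occ (w s : List Char) : Nat :=
  (List.range (s.length + 1)).countP (fun i => decide (w <+: s.drop i))

theorem join_nil_flatten (ps : List (List Char)) : PySem.Chars.join [] ps = ps.flatten := by
  unfold PySem.Chars.join List.intercalate
  induction ps with
  | nil => rfl
  | cons p ps ih =>
    cases ps with
    | nil => simp
    | cons q qs => simp_all [List.intersperse]

theorem col_eq (matrix : List (List String)) (j : Nat) :
    (List.range matrix.length).reverse.foldl
        (fun s i => s ++ ((matrix[i]?.getD [])[j]?.getD "").toList) ([] : List Char)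
      = colJoin matrix j := by
  rw [PySem.List.foldl_append_eq_flatMap, colJoin, join_nil_flatten, List.nil_append]
  have h1 : (List.range matrix.length).map (fun i => matrix[i]?.getD []) = matrix := by
    apply List.ext_getElem (by simp)
    intro i h1 h2
    simp [List.getElem?_eq_getElem h2]
  calc (List.range matrix.length).reverse.flatMap
        (fun i => ((matrix[i]?.getD [])[j]?.getD "").toList)
      = (((List.range matrix.length).map (fun i => matrix[i]?.getD [])).reverse.map
          (fun row => (row[j]?.getD "").toList)).flatten := by
        simp [List.flatMap_def, List.map_reverse, Function.comp_def]
    _ = _ := by rw [h1]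

theorem occ_pos_iff (w s : List Char) (hw : w ≠ []) :
    0 < occ w s ↔ PySem.Chars.isIn w s = true := by
  rw [occ, List.countP_pos_iff, ← PySem.Chars.exists_prefix_drop_iff_isIn]
  constructor
  · rintro ⟨i, _, hp⟩; exact ⟨i, by simpa using hp⟩
  · rintro ⟨j, hp⟩
    refine ⟨j, List.mem_range.mpr ?_, by simpa using hp⟩
    by_contra h
    have : s.length ≤ j := by omega
    rw [List.drop_eq_nil_of_le this] at hp
    exact hw (List.prefix_nil.mp hp)

theorem occ_shift (w s : List Char) (k : Nat) :
    occ w (s.drop k) = (List.range (s.length - k + 1)).countP (fun j => decide (w <+: s.drop (k + j))) := by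
  rw [occ, List.length_drop]
  apply List.countP_congr
  intro j hj
  simp [List.drop_drop]

theorem occ_split (w s : List Char) (hw : w ≠ [])
    (h : PySem.Chars.isIn w s = true) :
    occ w s = 1 + occ w (s.drop ((PySem.Chars.find s w).toNat + 1)) := by
  have hf : 0 ≤ PySem.Chars.find s w := (PySem.Chars.find_nonneg_iff s w).mpr ((PySem.Chars.isIn_iff_infix w s).mp h)
  obtain ⟨hpre, hmin⟩ := PySem.Chars.find_spec hf
  set p := (PySem.Chars.find s w).toNat with hp
  have hwlen : w.length + p ≤ s.length := by
    have := hpre.length_le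
    simp [List.length_drop] at this
    have hple : p ≤ s.length := by
      have := PySem.Chars.find_le_length s w
      omega
    omega
  have hplt : p < s.length := by
    have : 1 ≤ w.length := List.length_pos_iff.mpr hw
    omega
  have hsplit : s.length + 1 = (p + 1) + (s.length - p) := by omega
  rw [occ, hsplit, List.range_add, List.countP_append]
  have h1 : (List.range (p + 1)).countP (fun i => decide (w <+: s.drop i)) = 1 := by
    rw [List.range_succ, List.countP_append, List.countP_eq_zero.mpr (by
      intro a ha
      simp only [List.mem_range] at ha
      simpa using hmin a ha)]
    simpa using hpre
  have h2 : ((List.range (s.length - p)).map (fun x => (p + 1) + x)).countP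
      (fun i => decide (w <+: s.drop i)) = occ w (s.drop (p + 1)) := by
    rw [List.countP_map, occ_shift w s (p + 1)]
    have : s.length - (p + 1) + 1 = s.length - p := by omega
    rw [this]
    rfl
  rw [h1, h2]

theorem slice_find_succ (w s : List Char) (h : PySem.Chars.isIn w s = true) :
    PySem.List.slice s (some (PySem.Chars.find s w + 1)) none
      = s.drop ((PySem.Chars.find s w).toNat + 1) := by
  have hf : 0 ≤ PySem.Chars.find s w :=
    (PySem.Chars.find_nonneg_iff s w).mpr ((PySem.Chars.isIn_iff_infix w s).mp h)
  rw [PySem.List.slice_from s (by omega)]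
  congr 1
  omega

theorem countWordLoop_eq (w : List Char) (hw : w ≠ []) :
    ∀ (fuel : Nat) (short : List Char) (count : Int), short.length < fuel →
      countWordLoop w fuel short count = count + (occ w short : Int) := by
  intro fuel
  induction fuel with
  | zero => intro short count h; omega
  | succ fuel ih =>
    intro short count h
    rw [countWordLoop]
    by_cases hin : PySem.Chars.isIn w short = true
    · rw [if_pos hin, slice_find_succ w short hin]
      have hne : short ≠ [] := by
        rintro rfl
        exact hw (List.infix_nil.mp ((PySem.Chars.isIn_iff_infix w []).mp hin))
      have hlen : (short.drop ((PySem.Chars.find short w).toNat + 1)).length < fuel := by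
        rw [List.length_drop]
        have : 0 < short.length := List.length_pos_iff.mpr hne
        omega
      rw [ih _ _ hlen, occ_split w short hw hin]
      push_cast
      ring
    · rw [if_neg hin]
      have : occ w short = 0 := by
        by_contra hne
        exact hin ((occ_pos_iff w short hw).mp (by omega))
      rw [this]
      simp

theorem count_word_eq (w s : List Char) (hw : w ≠ [])
    (h : PySem.Chars.isIn w s = true) : count_word w s = (occ w s : Int) := by
  have hs : s ≠ [] := by
    rintro rfl
    exact hw (List.infix_nil.mp ((PySem.Chars.isIn_iff_infix w []).mp h))
  rw [count_word]
  simp only [if_neg hs]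
  rw [slice_find_succ w s h, countWordLoop_eq w hw _ _ _ (by omega),
    occ_split w s hw h]
  push_cast
  ring

theorem count_fold {κ : Type} [BEq κ] [LawfulBEq κ] (l : List Int) (f : Int → κ) (w : κ) :
    (l.foldl (fun c i => c.insert (f i) (c.getD (f i) 0 + 1))
      (PySem.Dict.empty : PySem.Dict κ Int)).getD w 0 = ((l.map f).count w : Int) := by
  rw [← List.foldl_map (f := f) (g := fun c x => c.insert x (c.getD x 0 + 1)) (l := l)
      (init := (PySem.Dict.empty : PySem.Dict κ Int)),
    PySem.Dict.getD_foldl_insert_add_one]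
  have h0 : (PySem.Dict.empty : PySem.Dict κ Int).getD w 0 = 0 := rfl
  rw [h0, zero_add]

theorem subCounter_getD (s w : List Char) (hw : w ≠ []) :
    (subCounter s (w.length : Int)).getD w 0 = (occ w s : Int) := by
  simp only [subCounter]
  rw [count_fold]
  congr 1
  by_cases hle : w.length ≤ s.length
  · have hsplit : s.length + 1 = (s.length - w.length + 1) + w.length := by
      have : 1 ≤ w.length := List.length_pos_iff.mpr hw
      omega
    have hzero : ((List.range w.length).map (fun x => (s.length - w.length + 1) + x)).countP
        (fun i => decide (w <+: s.drop i)) = 0 := by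
      rw [List.countP_eq_zero]
      intro a ha
      simp only [List.mem_map, List.mem_range] at ha
      obtain ⟨x, hx, rfl⟩ := ha
      simp only [decide_eq_true_eq]
      intro hp
      have := hp.length_le
      simp only [List.length_drop] at this
      omega
    have hocc : occ w s = (List.range (s.length - w.length + 1)).countP
        (fun k => decide (w <+: s.drop k)) := by
      rw [occ, hsplit, List.range_add, List.countP_append, hzero]
      omega
    have hm : ((s.length : Int) - (w.length : Int) + 1) = ((s.length - w.length + 1 : Nat) : Int) := by
      push_cast [hle]; omega
    rw [hm, PySem.List.pyRange_zero_natCast, List.map_map, List.count_eq_countP,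
      List.countP_map, hocc]
    apply List.countP_congr
    intro k _
    have h1 : ((k : Int) + ((w.length : Nat) : Int)) = ((k + w.length : Nat) : Int) := by push_cast; ring
    simp only [Function.comp_apply, h1, PySem.List.slice_natCast]
    have h2 : k + w.length - k = w.length := by omega
    rw [h2]
    by_cases h3 : List.take w.length (List.drop k s) = w
    · simp [h3, List.prefix_iff_eq_take]
    · simp only [List.prefix_iff_eq_take]
      rw [decide_eq_false (fun h => h3 h.symm)]
      simp [h3]
  · have hnil : PySem.List.pyRange 0 ((s.length : Int) - (w.length : Int) + 1) = [] := by
      rw [List.eq_nil_iff_forall_not_mem]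
      intro x hx
      rw [PySem.List.mem_pyRange_one] at hx
      omega
    rw [hnil]
    simp only [List.map_nil, List.count_nil]
    rw [occ]
    symm
    rw [List.countP_eq_zero]
    intro a _
    simp only [decide_eq_true_eq]
    intro hp
    have := hp.length_le
    simp only [List.length_drop] at this
    omega

theorem find?_map_pairs {β : Type} (f : Int → β) (L : Int) :
    ∀ (l : List Int), L ∈ l →
      (l.map (fun x => (x, f x))).find? (fun p => p.1 == L) = some (L, f L) := by
  intro l
  induction l with
  | nil => intro h; cases h
  | cons a l ih =>
    intro hL
    by_cases ha : a = L
    · subst ha; simp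
    · have hmem : L ∈ l := by
        rcases List.mem_cons.mp hL with h | h
        · exact absurd h.symm ha
        · exact h
      simpa [ha] using ih hmem

theorem counters_getD (s : List Char) (lengths : List Int) (hnd : lengths.Nodup)
    (L : Int) (hL : L ∈ lengths) :
    (lengths.foldl (fun cs L => cs.insert L (subCounter s L)) PySem.Dict.empty).getD L
      PySem.Dict.empty = subCounter s L := by
  have hitems := PySem.Dict.items_foldl_insert_fresh lengths (fun x => x) (subCounter s)
    (PySem.Dict.empty : PySem.Dict Int (PySem.Dict (List Char) Int))
    (fun a _ => rfl) (by simpa using hnd)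
  rw [PySem.Dict.getD, PySem.Dict.get?, hitems]
  simp only [List.nil_append, PySem.Dict.empty]
  rw [find?_map_pairs (subCounter s) L lengths hL]
  rfl

-- ===== VERDICT (by name: the statement is the Claim_ definition above) =====
theorem string_ne_empty_toList (w : String) (h : w ≠ "") : w.toList ≠ [] := by
  intro hnil
  apply h
  have := congrArg String.ofList hnil
  simpa using this

theorem per_word_step (s : List Char) (word_list : List String) (hw0 : "" ∉ word_list)
    (lengths : List Int)
    (hlen : lengths = PySem.List.sorted
      (PySem.Set.ofList ((word_list.filter (fun w => !(w.toList.isEmpty))).map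
        (fun w => (w.toList.length : Int)))) (fun x => x))
    (d : PySem.Dict String Int) (w : String) (hmem : w ∈ word_list) :
    (if PySem.Chars.isIn w.toList s then
      if d.contains w then d.modify w 0 (· + count_word w.toList s)
      else d.insert w (count_word w.toList s)
    else d)
    = (if ((lengths.foldl (fun cs L => cs.insert L (subCounter s L)) PySem.Dict.empty).getD
          ((w.toList.length : Int)) PySem.Dict.empty).getD w.toList 0 ≠ 0 then
        d.insert w (d.getD w 0 +
          ((lengths.foldl (fun cs L => cs.insert L (subCounter s L)) PySem.Dict.empty).getD
          ((w.toList.length : Int)) PySem.Dict.empty).getD w.toList 0)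
      else d) := by
  have hwne : w.toList ≠ [] := string_ne_empty_toList w (fun h => hw0 (h ▸ hmem))
  have hperm := PySem.List.sorted_perm
    (PySem.Set.ofList ((word_list.filter (fun w => !(w.toList.isEmpty))).map
      (fun w => (w.toList.length : Int)))) (fun x => x) false
  have hnd : lengths.Nodup := by
    rw [hlen]
    exact hperm.nodup_iff.mpr (PySem.Set.nodup_ofList _)
  have hL : ((w.toList.length : Nat) : Int) ∈ lengths := by
    rw [hlen, hperm.mem_iff, PySem.Set.mem_ofList]
    exact List.mem_map.mpr ⟨w, List.mem_filter.mpr ⟨hmem, by simp [hwne]⟩, rfl⟩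
  have hcnt : ((lengths.foldl (fun cs L => cs.insert L (subCounter s L)) PySem.Dict.empty).getD
      ((w.toList.length : Int)) PySem.Dict.empty).getD w.toList 0 = (occ w.toList s : Int) := by
    rw [counters_getD s lengths hnd _ hL, subCounter_getD s w.toList hwne]
  rw [hcnt]
  by_cases hin : PySem.Chars.isIn w.toList s = true
  · have hpos : 0 < occ w.toList s := (occ_pos_iff w.toList s hwne).mpr hin
    rw [if_pos hin, if_pos (show (occ w.toList s : Int) ≠ 0 by exact_mod_cast Nat.pos_iff_ne_zero.mp hpos)]
    by_cases hc : d.contains w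
    · rw [if_pos hc, PySem.Dict.modify, count_word_eq w.toList s hwne hin]
    · rw [if_neg hc, count_word_eq w.toList s hwne hin,
        PySem.Dict.getD_of_not_contains d 0 (by simpa using hc), zero_add]
  · have hzero : occ w.toList s = 0 := by
      by_contra hne
      exact hin ((occ_pos_iff w.toList s hwne).mp (by omega))
    rw [if_neg hin, hzero]
    simp

theorem check_up_spec : Claim_equal_check_up := by
  intro rd wl matrix _hdom hpre
  obtain ⟨-, -, hw⟩ := hpre
  by_cases hmem : "" ∈ wl
  · unfold Spec_check_up check_up check_up_alt
    rw [hw hmem]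
    rfl
  · have hw0 : "" ∉ wl := hmem
    unfold Spec_check_up check_up check_up_alt
    congr 1
    apply PySem.List.foldl_congr_mem
    intro d j _hj
    simp only [col_eq]
    rw [check_and_update]
    apply PySem.List.foldl_congr_mem
    intro d' w hwmem
    exact per_word_step (colJoin matrix j) wl hw0 _ rfl d' w hwmem
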